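-- pv_equiv track=rewrite | github.com/kimsiyeonA/Algorithm | 프로그래머스/0/120814. 피자 나눠 먹기 （1）/피자 나눠 먹기 （1）.py | solution
-- ===== SOURCE A (Python) =====
-- def solution(n):
--     if n % 7 == 0 :
--         sum = n // 7
--     else :
--         a = 0
--         sum = 0
--
--         while a < n :
--             if n // 7 == a:
--                 sum = a+1
--             a += 1
--
--     answer = sum
--     return answer
-- ===== SOURCE B (Python) =====
-- def solution(n):
--     # ceiling division by 7, closed form (upside-down floor division)
--     return -(-n // 7)
-- ===== Notes on version B (the rewrite author's own statement) =====
-- stated objective: faster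
-- what changed: Replaces the O(n) while-loop search for the index equal to n//7 by the closed-form ceiling division -(-n//7).
-- outside the precondition, e.g. on solution(-8): A returns 0, B returns -1; on solution(-15): A returns 0, B returns -2
import Mathlib
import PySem

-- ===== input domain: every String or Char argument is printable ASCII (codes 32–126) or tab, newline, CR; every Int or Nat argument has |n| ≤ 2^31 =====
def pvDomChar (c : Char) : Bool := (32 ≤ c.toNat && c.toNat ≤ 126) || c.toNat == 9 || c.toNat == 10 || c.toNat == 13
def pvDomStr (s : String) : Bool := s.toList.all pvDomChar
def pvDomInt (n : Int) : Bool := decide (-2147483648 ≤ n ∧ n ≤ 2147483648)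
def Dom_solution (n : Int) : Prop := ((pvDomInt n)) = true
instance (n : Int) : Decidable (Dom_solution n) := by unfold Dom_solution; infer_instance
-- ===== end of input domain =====

-- B computes ceil(n/7) with the closed form -(-n//7) instead of A's O(n) while-loop scan.


-- ===== PORT A =====
-- the while loop runs a = 0,1,…,n-1, i.e. exactly a fold over range(0, n)
def solution (n : Int) : Int :=
  if PySem.Int.mod n 7 = 0 then
    PySem.Int.floordiv n 7
  else
    (PySem.List.pyRange 0 n 1).foldl
      (fun sum a => if PySem.Int.floordiv n 7 = a then a + 1 else sum) 0

-- ===== PORT B =====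
def solution_alt (n : Int) : Int := -(PySem.Int.floordiv (-n) 7)

-- ===== PRECONDITION & SPEC =====
-- Pre_ restricts to the problem's natural domain n ≥ 0 (a count of pizza eaters);
-- for negative n A's while-loop never runs and it returns the leftover accumulator 0.
def Pre_solution (n : Int) : Prop := 0 ≤ n
instance (n : Int) : Decidable (Pre_solution n) := by unfold Pre_solution; infer_instance
def pvWitness_solution : Int := (8)
def Spec_solution (n : Int) (out : Int) : Prop := out = solution_alt n
instance (n : Int) (out : Int) : Decidable (Spec_solution n out) := by unfold Spec_solution; infer_instance

-- ===== CLAIM (what is proved, stated in full; the proofs are below) =====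
def Claim_equal_solution : Prop := ∀ (n : Int), Dom_solution n → Pre_solution n → Spec_solution n (solution n)

-- ===== LEMMAS AND PROOFS =====

-- the loop keeps the accumulator except when it meets k, where it sets it to k+1
theorem foldl_find_eq (k : Int) (l : List Int) (init : Int) :
    l.foldl (fun sum a => if k = a then a + 1 else sum) init
      = if k ∈ l then k + 1 else init := by
  induction l generalizing init with
  | nil => simp
  | cons x xs ih =>
    simp only [List.foldl_cons, ih, List.mem_cons]
    by_cases hx : k = x <;> by_cases hm : k ∈ xs <;> simp [hx, hm]

-- ===== VERDICT (by name: the statement is the Claim_ definition above) =====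
theorem solution_spec : Claim_equal_solution := by
  intro n _ hn
  unfold Pre_solution at hn
  unfold Spec_solution solution solution_alt
  have h7 : (0:Int) < 7 := by norm_num
  by_cases hm : PySem.Int.mod n 7 = 0
  · rw [if_pos hm]
    have : -(PySem.Int.floordiv (-n) 7) = PySem.Int.floordiv n 7 := by
      rw [PySem.Int.neg_floordiv_neg_eq_iff_of_pos (a := n) (b := 7) (q := PySem.Int.floordiv n 7) h7]
      have hmb := PySem.Int.floordiv_mul_add_mod n 7
      have hlt := PySem.Int.mod_lt n (b := 7) h7
      have hge := PySem.Int.mod_nonneg n (b := 7) h7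
      omega
    exact this.symm
  · rw [if_neg hm, foldl_find_eq]
    have hmb := PySem.Int.floordiv_mul_add_mod n 7
    have hlt := PySem.Int.mod_lt n (b := 7) h7
    have hge := PySem.Int.mod_nonneg n (b := 7) h7
    have hmem : PySem.Int.floordiv n 7 ∈ PySem.List.pyRange 0 n 1 := by
      rw [PySem.List.mem_pyRange_one]
      constructor <;> omega
    rw [if_pos hmem]
    have hq := (PySem.Int.neg_floordiv_neg_eq_iff_of_pos (a := n) (b := 7)
        (q := PySem.Int.floordiv n 7 + 1) h7).mpr (by constructor <;> omega)
    omega
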